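-- pv_equiv track=rewrite | github.com/Harsh-Bajpai-1194/Data_Structures_and_Algorithms | 1504-count-submatrices-with-all-ones/1504-count-submatrices-with-all-ones.py | countSubmatInHistogram
-- ===== SOURCE A (Python) =====
-- def countSubmatInHistogram(heights):
--     n = len(heights)
--     stack = []
--     count = [0] * n
--     ans = 0
--     for i in range(n):
--         while stack and heights[stack[-1]] >= heights[i]:
--             stack.pop()
--         if stack:
--             prev = stack[-1]
--             count[i] = count[prev] + heights[i] * (i - prev)
--         else:
--             count[i] = heights[i] * (i + 1)
--         stack.append(i)
--         ans += count[i]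
--     return ans
-- ===== SOURCE B (Python) =====
-- def countSubmatInHistogram(heights):
--     ans = 0
--     for i in range(len(heights)):
--         m = heights[i]
--         ans += m
--         for j in range(i - 1, -1, -1):
--             m = min(m, heights[j])
--             ans += m
--     return ans
-- ===== Notes on version B (the rewrite author's own statement) =====
-- stated objective: simpler
-- what changed: Replaced the monotonic stack with its count array and pop-based recurrence by a direct nested scan that, for each right endpoint, accumulates the running minimum over all left endpoints (sum of subarray minimums).
import Mathlib
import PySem

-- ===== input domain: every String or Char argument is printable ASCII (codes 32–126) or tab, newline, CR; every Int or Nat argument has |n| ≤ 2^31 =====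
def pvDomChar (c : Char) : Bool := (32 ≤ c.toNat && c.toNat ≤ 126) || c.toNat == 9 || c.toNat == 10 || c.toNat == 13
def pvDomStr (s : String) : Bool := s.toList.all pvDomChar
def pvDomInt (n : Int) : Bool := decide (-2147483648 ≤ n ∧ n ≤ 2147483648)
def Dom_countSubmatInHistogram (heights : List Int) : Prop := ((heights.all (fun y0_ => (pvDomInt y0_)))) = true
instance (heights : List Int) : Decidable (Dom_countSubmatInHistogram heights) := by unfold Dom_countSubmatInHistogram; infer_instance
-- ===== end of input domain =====

-- B replaces A's monotonic stack + count array by a plain nested running-minimum scan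
-- (sum of subarray minimums); objective: simpler, not faster (O(n^2) vs A's O(n)).

-- ===== PORT A =====
-- the Python 'while stack and heights[stack[-1]] >= heights[i]: stack.pop()' loop;
-- all stored indices are earlier loop indices, hence in range, so getD is exact here.
def pvPopWhile (hh : List Int) (x : Int) : List Nat → List Nat
  | [] => []
  | t :: rest => if hh.getD t 0 ≥ x then pvPopWhile hh x rest else t :: rest

-- literal port of A: stack (top at head), count array, running answer.
def countSubmatInHistogram (heights : List Int) : Int :=
  let n := heights.length
  let r := (List.range n).foldl (fun (s : List Nat × List Int × Int) i =>
    let stack := pvPopWhile heights (heights.getD i 0) s.1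
    let ci : Int := match stack with
      | prev :: _ => s.2.1.getD prev 0 + heights.getD i 0 * ((i : Int) - (prev : Int))
      | [] => heights.getD i 0 * ((i : Int) + 1)
    (i :: stack, s.2.1.set i ci, s.2.2 + ci)) ([], List.replicate n 0, 0)
  r.2.2

-- ===== PORT B =====
-- the inner 'for j in range(i-1, -1, -1): m = min(m, heights[j]); ans += m' loop;
-- j runs through i-1, …, 0, all in range, so getD is exact here.
def pvInner (hh : List Int) : Nat → Int → Int → Int
  | 0, _, acc => acc
  | j + 1, m, acc =>
    let m' := min m (hh.getD j 0)
    pvInner hh j m' (acc + m')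

-- literal port of B: for each i add heights[i], then scan left accumulating the minimum.
def countSubmatInHistogram_alt (heights : List Int) : Int :=
  (List.range heights.length).foldl (fun ans i =>
    pvInner heights i (heights.getD i 0) (ans + heights.getD i 0)) 0

-- ===== PRECONDITION & SPEC =====
def Spec_countSubmatInHistogram (heights : List Int) (out : Int) : Prop := out = countSubmatInHistogram_alt heights
instance (heights : List Int) (out : Int) : Decidable (Spec_countSubmatInHistogram heights out) := by unfold Spec_countSubmatInHistogram; infer_instance

-- ===== CLAIM (what is proved, stated in full; the proofs are below) =====
def Claim_equal_countSubmatInHistogram : Prop := ∀ (heights : List Int), Dom_countSubmatInHistogram heights → Spec_countSubmatInHistogram heights (countSubmatInHistogram heights)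

-- ===== LEMMAS AND PROOFS =====

-- h as a function on indices
def pvH (hh : List Int) (k : Nat) : Int := hh.getD k 0

-- minimum of hh over indices j..i (for j ≤ i)
def pvM (hh : List Int) (j i : Nat) : Int :=
  if i ≤ j then pvH hh i else min (pvH hh j) (pvM hh (j+1) i)
termination_by i - j
decreasing_by omega

-- sum of subarray minimums of subarrays ending at i
def pvS (hh : List Int) (i : Nat) : Int := ∑ j ∈ Finset.range (i+1), pvM hh j i

-- canonical stack contents at the start of iteration i
def pvStk (hh : List Int) : Nat → List Nat
  | 0 => []
  | i + 1 => i :: pvPopWhile hh (pvH hh i) (pvStk hh i)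

-- canonical count array after i iterations
def pvCnt (hh : List Int) (i : Nat) : List Int :=
  (List.range hh.length).map (fun j => if j < i then pvS hh j else 0)

theorem pvM_self (hh : List Int) (i : Nat) : pvM hh i i = pvH hh i := by
  unfold pvM; simp

theorem pvM_step (hh : List Int) {j i : Nat} (hji : j < i) :
    pvM hh j i = min (pvH hh j) (pvM hh (j+1) i) := by
  rw [pvM]; simp [Nat.not_le.mpr hji]

theorem pvM_le_right (hh : List Int) {j i : Nat} (hji : j ≤ i) : pvM hh j i ≤ pvH hh i := by
  induction' hn : i - j with k ih generalizing j
  · have : j = i := by omega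
    subst this; rw [pvM_self]
  · have hji' : j < i := by omega
    rw [pvM_step hh hji']
    exact le_trans (min_le_right _ _) (ih (by omega) (by omega))

theorem pvM_high (hh : List Int) {j i : Nat} (hji : j ≤ i)
    (hyp : ∀ k, j ≤ k → k < i → pvH hh i ≤ pvH hh k) : pvM hh j i = pvH hh i := by
  induction' hn : i - j with m ih generalizing j
  · have : j = i := by omega
    rw [this]; exact pvM_self hh i
  · have hji' : j < i := by omega
    rw [pvM_step hh hji', ih (by omega) (fun k hk1 hk2 => hyp k (by omega) hk2) (by omega)]
    exact min_eq_right (hyp j le_rfl hji')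

theorem pvM_split (hh : List Int) {j p i : Nat} (hjp : j ≤ p) (hpi : p < i) :
    pvM hh j i = min (pvM hh j p) (pvM hh (p+1) i) := by
  induction' hn : p - j with m ih generalizing j
  · have : j = p := by omega
    subst this
    rw [pvM_step hh hpi, pvM_self]
  · have hjp' : j < p := by omega
    rw [pvM_step hh (by omega : j < i), ih (by omega) (by omega),
        pvM_step hh hjp', min_assoc]

-- pvPopWhile basic facts
theorem pvStk_succ (hh : List Int) (n : Nat) :
    pvStk hh (n+1) = n :: pvPopWhile hh (pvH hh n) (pvStk hh n) := rfl

theorem pvPopWhile_subset (hh : List Int) (x : Int) :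
    ∀ st : List Nat, ∀ a ∈ pvPopWhile hh x st, a ∈ st := by
  intro st
  induction st with
  | nil => intro a ha; rw [pvPopWhile] at ha; exact ha
  | cons t rest ih =>
    intro a ha
    rw [pvPopWhile] at ha
    by_cases hc : hh.getD t 0 ≥ x
    · rw [if_pos hc] at ha
      exact List.mem_cons_of_mem _ (ih a ha)
    · rw [if_neg hc] at ha
      exact ha

theorem pvPopWhile_mem_split (hh : List Int) (x : Int) :
    ∀ st : List Nat, ∀ a ∈ st, a ∈ pvPopWhile hh x st ∨ x ≤ hh.getD a 0 := by
  intro st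
  induction st with
  | nil => intro a ha; simp at ha
  | cons t rest ih =>
    intro a ha
    rw [pvPopWhile]
    by_cases hc : hh.getD t 0 ≥ x
    · rw [if_pos hc]
      rcases List.mem_cons.mp ha with rfl | ha'
      · exact Or.inr hc
      · exact ih a ha'
    · rw [if_neg hc]
      exact Or.inl ha

theorem pvPopWhile_head_lt (hh : List Int) (x : Int) :
    ∀ st : List Nat, ∀ p rest, pvPopWhile hh x st = p :: rest → hh.getD p 0 < x := by
  intro st
  induction st with
  | nil => intro p rest h; rw [pvPopWhile] at h; exact absurd h (by simp)
  | cons t r ih =>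
    intro p rest h
    rw [pvPopWhile] at h
    by_cases hc : hh.getD t 0 ≥ x
    · rw [if_pos hc] at h
      exact ih p rest h
    · rw [if_neg hc] at h
      have : t = p := (List.cons.injEq _ _ _ _ ▸ h).1
      subst this; omega

theorem pvPopWhile_pairwise {R : Nat → Nat → Prop} (hh : List Int) (x : Int) :
    ∀ st : List Nat, List.Pairwise R st → List.Pairwise R (pvPopWhile hh x st) := by
  intro st
  induction st with
  | nil => intro _; rw [pvPopWhile]; exact List.Pairwise.nil
  | cons t r ih =>
    intro hp
    rw [pvPopWhile]
    by_cases hc : hh.getD t 0 ≥ x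
    · rw [if_pos hc]
      exact ih (List.Pairwise.of_cons hp)
    · rw [if_neg hc]
      exact hp

-- stack invariants
theorem pvStk_mem_lt (hh : List Int) : ∀ i, ∀ j ∈ pvStk hh i, j < i := by
  intro i
  induction i with
  | zero => intro j hj; simp [pvStk] at hj
  | succ n ih =>
    intro j hj
    rw [pvStk_succ] at hj
    rcases List.mem_cons.mp hj with rfl | hj'
    · omega
    · exact lt_trans (ih j (pvPopWhile_subset hh _ _ j hj')) (by omega)

theorem pvStk_pairwise (hh : List Int) :
    ∀ i, List.Pairwise (fun a b => b < a ∧ pvH hh b < pvH hh a) (pvStk hh i) := by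
  intro i
  induction i with
  | zero => simp [pvStk]
  | succ n ih =>
    have hpw := pvPopWhile_pairwise hh (pvH hh n) _ ih
    rw [pvStk_succ, List.pairwise_cons]
    refine ⟨?_, hpw⟩
    intro b hb
    have hbn : b < n := pvStk_mem_lt hh n b (pvPopWhile_subset hh _ _ b hb)
    refine ⟨hbn, ?_⟩
    rcases he : pvPopWhile hh (pvH hh n) (pvStk hh n) with _ | ⟨p, rest⟩
    · rw [he] at hb; simp at hb
    · have hp : pvH hh p < pvH hh n := pvPopWhile_head_lt hh _ _ p rest he
      rw [he] at hb hpw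
      rcases List.mem_cons.mp hb with rfl | hb'
      · exact hp
      · exact lt_trans ((List.pairwise_cons.mp hpw).1 b hb').2 hp

theorem pvStk_cover (hh : List Int) :
    ∀ i, ∀ k < i, ∃ j ∈ pvStk hh i, k ≤ j ∧ pvH hh j ≤ pvH hh k := by
  intro i
  induction i with
  | zero => intro k hk; omega
  | succ n ih =>
    intro k hk
    by_cases hkn : k = n
    · subst hkn
      exact ⟨k, by rw [pvStk_succ]; exact List.mem_cons_self .., le_rfl, le_rfl⟩
    · obtain ⟨j, hjmem, hkj, hjh⟩ := ih k (by omega)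
      rcases pvPopWhile_mem_split hh (pvH hh n) _ j hjmem with hin | hge
      · exact ⟨j, by rw [pvStk_succ]; exact List.mem_cons_of_mem _ hin, hkj, hjh⟩
      · exact ⟨n, by rw [pvStk_succ]; exact List.mem_cons_self .., by omega, le_trans hge hjh⟩

-- characterization of the popped stack's head
theorem pvPrev_none (hh : List Int) (i : Nat)
    (he : pvPopWhile hh (pvH hh i) (pvStk hh i) = []) :
    ∀ k < i, pvH hh i ≤ pvH hh k := by
  intro k hk
  obtain ⟨j, hjmem, _, hjh⟩ := pvStk_cover hh i k hk
  rcases pvPopWhile_mem_split hh (pvH hh i) _ j hjmem with hin | hge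
  · rw [he] at hin; simp at hin
  · exact le_trans hge hjh

theorem pvPrev_some (hh : List Int) (i p : Nat) (rest : List Nat)
    (he : pvPopWhile hh (pvH hh i) (pvStk hh i) = p :: rest) :
    p < i ∧ pvH hh p < pvH hh i ∧ ∀ k, p < k → k < i → pvH hh i ≤ pvH hh k := by
  have hpmem : p ∈ pvStk hh i :=
    pvPopWhile_subset hh _ _ p (by rw [he]; simp)
  have hpi : p < i := pvStk_mem_lt hh i p hpmem
  have hplt : pvH hh p < pvH hh i := pvPopWhile_head_lt hh _ _ p rest he
  refine ⟨hpi, hplt, ?_⟩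
  intro k hpk hki
  obtain ⟨j, hjmem, hkj, hjh⟩ := pvStk_cover hh i k hki
  rcases pvPopWhile_mem_split hh (pvH hh i) _ j hjmem with hin | hge
  · exfalso
    rw [he] at hin
    have hpw := pvPopWhile_pairwise hh (pvH hh i) _ (pvStk_pairwise hh i)
    rw [he, List.pairwise_cons] at hpw
    rcases List.mem_cons.mp hin with rfl | hj'
    · omega
    · have := (hpw.1 j hj').1; omega
  · exact le_trans hge hjh

-- the two recurrences for pvS
theorem pvS_noprev (hh : List Int) (i : Nat)
    (hyp : ∀ k < i, pvH hh i ≤ pvH hh k) :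
    pvS hh i = pvH hh i * ((i : Int) + 1) := by
  unfold pvS
  have : ∀ j ∈ Finset.range (i+1), pvM hh j i = pvH hh i := by
    intro j hj
    exact pvM_high hh (by simpa using Nat.lt_succ_iff.mp (Finset.mem_range.mp hj))
      (fun k _ hk => hyp k hk)
  rw [Finset.sum_congr rfl this, Finset.sum_const, Finset.card_range, nsmul_eq_mul]
  push_cast
  ring

theorem pvS_prev (hh : List Int) (i p : Nat) (hpi : p < i)
    (hplt : pvH hh p < pvH hh i)
    (hyp : ∀ k, p < k → k < i → pvH hh i ≤ pvH hh k) :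
    pvS hh i = pvS hh p + pvH hh i * ((i : Int) - (p : Int)) := by
  have h1 : ∀ j ∈ Finset.Ico 0 (p+1), pvM hh j i = pvM hh j p := by
    intro j hj
    have hjp : j ≤ p := by have := (Finset.mem_Ico.mp hj).2; omega
    rw [pvM_split hh hjp hpi]
    have hMp1 : pvM hh (p+1) i = pvH hh i :=
      pvM_high hh (by omega) (fun k hk1 hk2 => hyp k (by omega) hk2)
    rw [hMp1]
    exact min_eq_left (le_trans (pvM_le_right hh hjp) (le_of_lt hplt))
  have h2 : ∀ j ∈ Finset.Ico (p+1) (i+1), pvM hh j i = pvH hh i := by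
    intro j hj
    obtain ⟨hj1, hj2⟩ := Finset.mem_Ico.mp hj
    exact pvM_high hh (by omega) (fun k hk1 hk2 => hyp k (by omega) hk2)
  rw [pvS, pvS, Finset.range_eq_Ico,
      ← Finset.sum_Ico_consecutive (fun j => pvM hh j i) (Nat.zero_le (p+1)) (by omega : p+1 ≤ i+1),
      Finset.sum_congr rfl h1, Finset.sum_congr rfl h2,
      Finset.sum_const, Nat.card_Ico, nsmul_eq_mul]
  have hc : ((i + 1 - (p + 1) : Nat) : Int) = (i : Int) - (p : Int) := by omega
  rw [hc]
  ring

-- pvCnt facts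
theorem pvCnt_getD (hh : List Int) (i p : Nat) (hp : p < hh.length) :
    (pvCnt hh i).getD p 0 = if p < i then pvS hh p else 0 := by
  unfold pvCnt
  rw [List.getD_eq_getElem?_getD]
  simp [hp]

theorem pvCnt_zero (hh : List Int) : pvCnt hh 0 = List.replicate hh.length 0 := by
  unfold pvCnt
  apply List.ext_getElem
  · simp
  · intro n h1 h2
    simp

theorem pvCnt_set (hh : List Int) (i : Nat) (hi : i < hh.length) :
    (pvCnt hh i).set i (pvS hh i) = pvCnt hh (i+1) := by
  apply List.ext_getElem
  · simp [pvCnt]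
  · intro n h1 h2
    have hn : n < hh.length := by simpa [pvCnt] using h2
    by_cases hni : n = i
    · subst hni
      simp [pvCnt, List.getElem_set, hn]
    · simp [pvCnt, List.getElem_set, hn, hni]
      by_cases hlt : n < i
      · rw [if_neg (fun h => hni h.symm), if_pos (by omega : n ≤ i), if_pos hlt]
      · rw [if_neg (fun h => hni h.symm), if_neg (by omega : ¬ n ≤ i), if_neg hlt]

-- A's fold invariant
theorem pvFoldA (hh : List Int) :
    ∀ i, i ≤ hh.length →
    (List.range i).foldl (fun (s : List Nat × List Int × Int) k =>
      let stack := pvPopWhile hh (hh.getD k 0) s.1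
      let ck : Int := match stack with
        | prev :: _ => s.2.1.getD prev 0 + hh.getD k 0 * ((k : Int) - (prev : Int))
        | [] => hh.getD k 0 * ((k : Int) + 1)
      (k :: stack, s.2.1.set k ck, s.2.2 + ck)) ([], List.replicate hh.length 0, 0)
    = (pvStk hh i, pvCnt hh i, ∑ j ∈ Finset.range i, pvS hh j) := by
  intro i
  induction i with
  | zero => simp [pvStk, pvCnt_zero]
  | succ n ih =>
    intro hle
    rw [List.range_succ, List.foldl_append, ih (by omega)]
    simp only [List.foldl_cons, List.foldl_nil]
    have hstk : pvStk hh (n+1) = n :: pvPopWhile hh (pvH hh n) (pvStk hh n) := rfl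
    have hx : hh.getD n 0 = pvH hh n := rfl
    rcases he : pvPopWhile hh (pvH hh n) (pvStk hh n) with _ | ⟨p, rest⟩
    · -- empty stack case
      have hS : pvS hh n = pvH hh n * ((n : Int) + 1) :=
        pvS_noprev hh n (pvPrev_none hh n he)
      simp only [hx, he]
      rw [hstk, he, ← hS, pvCnt_set hh n (by omega), Finset.sum_range_succ]
    · -- prev case
      obtain ⟨hpn, hplt, hyp⟩ := pvPrev_some hh n p rest he
      have hS : pvS hh n = pvS hh p + pvH hh n * ((n : Int) - (p : Int)) :=
        pvS_prev hh n p hpn hplt hyp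
      have hcnt : (pvCnt hh n).getD p 0 = pvS hh p := by
        rw [pvCnt_getD hh n p (by omega)]
        simp [hpn]
      simp only [hx, he]
      rw [hstk, he, hcnt, ← hS, pvCnt_set hh n (by omega), Finset.sum_range_succ]

-- B's inner-loop invariant
theorem pvInner_eq (hh : List Int) (i : Nat) :
    ∀ j, j ≤ i → ∀ acc : Int,
    pvInner hh j (pvM hh j i) acc = acc + ∑ k ∈ Finset.range j, pvM hh k i := by
  intro j
  induction j with
  | zero => intro _ acc; simp [pvInner]
  | succ m ih =>
    intro hji acc
    have hmi : m < i := by omega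
    have hmin : min (pvM hh (m+1) i) (hh.getD m 0) = pvM hh m i := by
      rw [pvM_step hh hmi, min_comm]; rfl
    rw [pvInner, hmin, ih (by omega), Finset.sum_range_succ]
    ring

-- B's fold
theorem pvFoldB (hh : List Int) :
    ∀ m : Nat, ∀ a : Int,
    (List.range m).foldl (fun ans i =>
      pvInner hh i (hh.getD i 0) (ans + hh.getD i 0)) a
    = a + ∑ j ∈ Finset.range m, pvS hh j := by
  intro m
  induction m with
  | zero => intro a; simp
  | succ n ih =>
    intro a
    rw [List.range_succ, List.foldl_append, ih]
    simp only [List.foldl_cons, List.foldl_nil]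
    have hgd : hh.getD n 0 = pvM hh n n := (pvM_self hh n).symm
    rw [hgd, pvInner_eq hh n n le_rfl]
    have hS : pvS hh n = (∑ k ∈ Finset.range n, pvM hh k n) + pvM hh n n := by
      rw [pvS, Finset.sum_range_succ]
    rw [Finset.sum_range_succ (fun j => pvS hh j) n, hS]
    ring

-- ===== VERDICT (by name: the statement is the Claim_ definition above) =====
theorem countSubmatInHistogram_spec : Claim_equal_countSubmatInHistogram := by
  intro heights _
  unfold Spec_countSubmatInHistogram
  have hA : countSubmatInHistogram heights = ∑ j ∈ Finset.range heights.length, pvS heights j :=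
    congrArg (fun t => t.2.2) (pvFoldA heights heights.length le_rfl)
  have hB : countSubmatInHistogram_alt heights = 0 + ∑ j ∈ Finset.range heights.length, pvS heights j :=
    pvFoldB heights heights.length 0
  rw [hA, hB, zero_add]
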